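-- pv_equiv track=rewrite | github.com/LysSanzMoreta/LYS_Automatic_Search | lysautosearch/src/lysautosearch/utils.py | url_reader
-- ===== SOURCE A (Python) =====
-- def url_reader(lines):
--     """Matches a pattern and reads and stores the lines until it finds another identical pattern"""
--     buffer = []
--     for string in lines:
--         if string.startswith('><a name'):
--             if buffer: yield buffer
--             buffer = [string]
--         else:
--             buffer.append(string)
--     yield buffer
-- ===== SOURCE B (Python) =====
-- def url_reader(lines):
--     """Matches a pattern and reads and stores the lines until it finds another identical pattern"""
--     L = list(lines)
--     bounds = [i for i, s in enumerate(L) if s.startswith('><a name')]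
--     if not bounds:
--         yield L
--         return
--     if bounds[0] > 0:
--         yield L[:bounds[0]]
--     for b, e in zip(bounds, bounds[1:] + [len(L)]):
--         yield L[b:e]
-- ===== Notes on version B (the rewrite author's own statement) =====
-- stated objective: alternative
-- what changed: Replaces A's incremental buffer-and-flush accumulation with one pass that records the marker boundary indices and then yields slices between consecutive boundaries.
import Mathlib
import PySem

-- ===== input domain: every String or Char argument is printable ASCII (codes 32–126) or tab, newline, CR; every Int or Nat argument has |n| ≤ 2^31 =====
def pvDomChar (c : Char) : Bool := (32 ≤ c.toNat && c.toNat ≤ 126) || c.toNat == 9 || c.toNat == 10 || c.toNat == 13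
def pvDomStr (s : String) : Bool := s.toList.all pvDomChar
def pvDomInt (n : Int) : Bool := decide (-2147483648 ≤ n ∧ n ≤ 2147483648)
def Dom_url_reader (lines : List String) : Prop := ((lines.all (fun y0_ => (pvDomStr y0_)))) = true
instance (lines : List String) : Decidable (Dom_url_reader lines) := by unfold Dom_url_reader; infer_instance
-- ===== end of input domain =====

-- B replaces A's incremental buffer-and-flush accumulation with a boundary-index pass
-- followed by slicing; the equivalence below is about the list of yielded values.

-- ===== PORT A =====
-- the generator's loop: state is the current buffer; the final buffer is always yielded
def urlLoopA (rest : List String) (buffer : List String) : List (List String) :=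
  match rest with
  | [] => [buffer]
  | s :: t =>
      if PySem.Str.startswith s "><a name" then
        (if buffer ≠ [] then [buffer] else []) ++ urlLoopA t [s]
      else
        urlLoopA t (buffer ++ [s])

def url_reader (lines : List String) : List (List String) :=
  urlLoopA lines []

-- ===== PORT B =====
def url_reader_alt (lines : List String) : List (List String) :=
  let L := lines
  let bounds := ((PySem.List.enumerate L).filter
      (fun p => PySem.Str.startswith p.2 "><a name")).map (·.1)
  match bounds with
  | [] => [L]
  | b0 :: _ =>
      (if b0 > 0 then [PySem.List.slice L none (some b0)] else []) ++
      (List.zip bounds (bounds.tail ++ [(L.length : Int)])).map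
        (fun p => PySem.List.slice L (some p.1) (some p.2))

-- ===== PRECONDITION & SPEC =====
def Spec_url_reader (lines : List String) (out : List (List String)) : Prop := out = url_reader_alt lines
instance (lines : List String) (out : List (List String)) : Decidable (Spec_url_reader lines out) := by unfold Spec_url_reader; infer_instance

-- ===== CLAIM (what is proved, stated in full; the proofs are below) =====
def Claim_equal_url_reader : Prop := ∀ (lines : List String), Dom_url_reader lines → Spec_url_reader lines (url_reader lines)

-- ===== LEMMAS AND PROOFS =====

-- Nat-level boundary indices (proof-side model of B's `bounds`)
def nb (t : List String) : List Nat :=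
  match t with
  | [] => []
  | x :: t =>
      (if PySem.Str.startswith x "><a name" then [0] else []) ++ (nb t).map (· + 1)

-- Nat-level chunks (proof-side model of B's zip/slice pass)
def chunksN (L : List String) (bs : List Nat) : List (List String) :=
  (List.zip bs (bs.tail ++ [L.length])).map (fun p => (L.drop p.1).take (p.2 - p.1))

-- B's Int bounds are the cast of nb (generalized over the enumerate start)
theorem bounds_eq_nb (t : List String) (k : Nat) :
    ((PySem.List.enumerate t (k : Int)).filter
        (fun p => PySem.Str.startswith p.2 "><a name")).map (·.1)
      = (nb t).map (fun n : Nat => ((k + n : Nat) : Int)) := by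
  induction t generalizing k with
  | nil => simp [PySem.List.enumerate_nil, nb]
  | cons x t ih =>
      rw [PySem.List.enumerate_cons]
      have h1 : ((k : Int) + 1) = ((k + 1 : Nat) : Int) := by push_cast; ring
      have hmap : (nb t).map (fun n : Nat => ((k + 1 + n : Nat) : Int))
          = ((nb t).map (fun n => n + 1)).map (fun n : Nat => ((k + n : Nat) : Int)) := by
        rw [List.map_map]
        apply List.map_congr_left; intro n _
        simp [Function.comp]; omega
      by_cases hm : PySem.Str.startswith x "><a name"
      · rw [List.filter_cons_of_pos (by simpa using hm), List.map_cons, h1, ih (k + 1)]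
        show ((k : Int), x).1 :: _ = _
        rw [show nb (x :: t) = 0 :: (nb t).map (fun n => n + 1) by
          simp only [nb, if_pos hm]; rfl]
        rw [List.map_cons, hmap]
        norm_num
      · rw [List.filter_cons_of_neg (by simpa using hm), h1, ih (k + 1)]
        rw [show nb (x :: t) = (nb t).map (fun n => n + 1) by
          simp only [nb, if_neg hm]; rfl]
        rw [hmap]

-- dropping the head shifts the chunk pass down by one
theorem chunksN_shift (x : String) (t : List String) (bs : List Nat) :
    chunksN (x :: t) (bs.map (· + 1)) = chunksN t bs := by
  unfold chunksN
  have htl : (bs.map (· + 1)).tail = bs.tail.map (· + 1) := by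
    cases bs <;> simp
  rw [htl]
  have happ : bs.tail.map (· + 1) ++ [(x :: t).length] = (bs.tail ++ [t.length]).map (· + 1) := by
    simp
  rw [happ, List.zip_map]
  rw [List.map_map]
  apply List.map_congr_left
  intro p _
  simp [Nat.add_sub_add_right]

-- chunk pass for a cons'ed nonempty bounds list
theorem chunksN_cons (L : List String) (b : Nat) (c : Nat) (r : List Nat) :
    chunksN L (b :: c :: r) = (L.drop b).take (c - b) :: chunksN L (c :: r) := by
  simp [chunksN]

-- main invariant: A's loop from any buffer is lead ++ chunks of the boundary pass
theorem urlLoopA_eq (t : List String) (buffer : List String) :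
    urlLoopA t buffer =
      match nb t with
      | [] => [buffer ++ t]
      | b0 :: _ =>
          (if buffer ++ t.take b0 ≠ [] then [buffer ++ t.take b0] else []) ++ chunksN t (nb t) := by
  induction t generalizing buffer with
  | nil => simp [urlLoopA, nb]
  | cons x t ih =>
      by_cases hm : PySem.Str.startswith x "><a name"
      · have hA : urlLoopA (x :: t) buffer
            = (if buffer ≠ [] then [buffer] else []) ++ urlLoopA t [x] := by
          show (if PySem.Str.startswith x "><a name" = true then
              (if buffer ≠ [] then [buffer] else []) ++ urlLoopA t [x]
            else urlLoopA t (buffer ++ [x])) = _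
          rw [if_pos hm]
        have hnb : nb (x :: t) = 0 :: (nb t).map (· + 1) := by
          simp only [nb, if_pos hm]; rfl
        rw [hA, ih [x], hnb]
        cases hbt : nb t with
        | nil =>
            simp [chunksN]
        | cons b0' r =>
            have hx : (x :: t).take (b0' + 1) = x :: t.take b0' := by simp
            have : chunksN (x :: t) (0 :: (b0' + 1) :: r.map (· + 1))
                = (x :: t.take b0') :: chunksN (x :: t) ((b0' :: r).map (· + 1)) := by
              rw [chunksN_cons]
              simp [List.map_cons, hx]
            simp only [List.map_cons]
            rw [this, chunksN_shift x t (b0' :: r)]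
            simp
      · have hA : urlLoopA (x :: t) buffer = urlLoopA t (buffer ++ [x]) := by
          show (if PySem.Str.startswith x "><a name" = true then
              (if buffer ≠ [] then [buffer] else []) ++ urlLoopA t [x]
            else urlLoopA t (buffer ++ [x])) = _
          rw [if_neg hm]
        have hnb : nb (x :: t) = (nb t).map (· + 1) := by
          simp only [nb, if_neg hm]; rfl
        rw [hA, ih (buffer ++ [x]), hnb]
        cases hbt : nb t with
        | nil => simp
        | cons b0' r =>
            have hx : (x :: t).take (b0' + 1) = x :: t.take b0' := by simp
            have hsh : chunksN (x :: t) ((b0' + 1) :: List.map (fun n => n + 1) r)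
                = chunksN t (b0' :: r) := by
              simpa using chunksN_shift x t (b0' :: r)
            simp only [List.map_cons]
            rw [hsh]
            simp [hx]

-- zipping two cast lists is the cast of the Nat-level zip
theorem zip_cast_aux (xs ys : List Nat) :
    (xs.map (fun n : Nat => (n : Int))).zip (ys.map (fun n : Nat => (n : Int)))
      = (xs.zip ys).map (fun p => ((p.1 : Int), (p.2 : Int))) := by
  induction xs generalizing ys with
  | nil => simp
  | cons x xs ih => cases ys <;> simp [ih]

-- zipping cast bounds with their cast successors is the cast of the Nat-level zip
theorem zip_cast (a : Nat) (l : List Nat) (m : Nat) :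
    ((a : Int) :: l.map (fun n : Nat => (n : Int))).zip
        (((a : Int) :: l.map (fun n : Nat => (n : Int))).tail ++ [(m : Int)])
      = ((a :: l).zip ((a :: l).tail ++ [m])).map (fun p => ((p.1 : Int), (p.2 : Int))) := by
  simp only [List.tail_cons]
  rw [show ((a : Int) :: l.map (fun n : Nat => (n : Int))) = (a :: l).map (fun n : Nat => (n : Int)) from rfl,
      show (l.map (fun n : Nat => (n : Int)) ++ [(m : Int)]) = (l ++ [m]).map (fun n : Nat => (n : Int)) from by
        simp,
      zip_cast_aux]

-- B's definition computed through the Nat-level model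
theorem alt_eq (L : List String) :
    url_reader_alt L =
      match nb L with
      | [] => [L]
      | b0 :: _ =>
          (if L.take b0 ≠ [] then [L.take b0] else []) ++ chunksN L (nb L) := by
  have hb := bounds_eq_nb L 0
  simp only [Nat.cast_zero, Nat.zero_add] at hb
  unfold url_reader_alt
  simp only [hb]
  cases hbt : nb L with
  | nil => simp
  | cons b0 r =>
      have hL : L ≠ [] := by
        intro h; rw [h] at hbt; simp [nb] at hbt
      have hcast : ((b0 : Int) > 0) ↔ (0 < b0) := by exact_mod_cast Iff.rfl
      simp only [List.map_cons]
      rw [zip_cast b0 r L.length, List.map_map]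
      have hlead : PySem.List.slice L none (some ((b0 : Nat) : Int)) = L.take b0 :=
        PySem.List.slice_to_natCast L b0
      have hchunks : (List.zip (b0 :: r) ((b0 :: r).tail ++ [L.length])).map
            ((fun p => PySem.List.slice L (some p.1) (some p.2)) ∘
              (fun p => ((p.1 : Int), (p.2 : Int))))
          = chunksN L (b0 :: r) := by
        unfold chunksN
        apply List.map_congr_left
        intro p _
        simp [Function.comp, PySem.List.slice_natCast]
      have htake : (¬ L.take b0 = []) ↔ ((b0 : Int) > 0) := by
        rw [hcast]
        constructor
        · intro h; by_contra hb2
          have hb0 : b0 = 0 := by omega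
          subst hb0; simp at h
        · intro h
          cases L with
          | nil => exact absurd rfl hL
          | cons a L' => cases b0 with
            | zero => omega
            | succ n => simp
      rw [hchunks, hlead]
      by_cases hb : (b0 : Int) > 0
      · simp [hcast.mp hb, htake.mpr hb]
      · have hb0 : b0 = 0 := by rw [hcast] at hb; omega
        simp [hb0]

-- ===== VERDICT (by name: the statement is the Claim_ definition above) =====
theorem url_reader_spec : Claim_equal_url_reader := by
  intro lines _
  show url_reader lines = url_reader_alt lines
  rw [url_reader, urlLoopA_eq, alt_eq]
  cases nb lines <;> simp
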